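-- pv_equiv track=rewrite | github.com/kyubin-l/advent-of-code | 2023/python/q5.py | check_seed_in_range_and_value_to_seed_range
-- ===== SOURCE A (Python) =====
-- def check_seed_in_range_and_value_to_seed_range(
--     value: int, seeds: list[int]
-- ) -> tuple[bool, int]:
--     seed_starts: list[int] = []
--     for seed_start, range_length in zip(seeds[::2], seeds[1::2]):
--         seed_starts.append(seed_start)
--         delta = value - seed_start
--         if delta >= 0 and delta <= range_length:
--             return True, -1
--     possible_starts = [start for start in seed_starts if start > value]
--     if not possible_starts:
--         jump = -1
--     else:
--         jump = min(possible_starts) - value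
--     return False, jump
-- ===== SOURCE B (Python) =====
-- def check_seed_in_range_and_value_to_seed_range(
--     value: int, seeds: list[int]
-- ) -> tuple[bool, int]:
--     # Sort the (start, length) pairs by start; on the sorted sequence the first
--     # start exceeding value is the minimum such start, and no pair at or beyond
--     # it can contain value, so one early-terminating scan decides everything.
--     for seed_start, range_length in sorted(
--         zip(seeds[::2], seeds[1::2]), key=lambda pair: pair[0]
--     ):
--         if seed_start > value:
--             return False, seed_start - value
--         if value - seed_start <= range_length:
--             return True, -1
--     return False, -1
-- ===== Notes on version B (the rewrite author's own statement) =====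
-- stated objective: alternative
-- what changed: B sorts the (start,length) pairs by start and does one early-terminating scan of the sorted list (the first start above value is the minimal jump target and ends the scan), instead of A's unsorted scan plus a filter comprehension plus a min() pass.
import Mathlib
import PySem

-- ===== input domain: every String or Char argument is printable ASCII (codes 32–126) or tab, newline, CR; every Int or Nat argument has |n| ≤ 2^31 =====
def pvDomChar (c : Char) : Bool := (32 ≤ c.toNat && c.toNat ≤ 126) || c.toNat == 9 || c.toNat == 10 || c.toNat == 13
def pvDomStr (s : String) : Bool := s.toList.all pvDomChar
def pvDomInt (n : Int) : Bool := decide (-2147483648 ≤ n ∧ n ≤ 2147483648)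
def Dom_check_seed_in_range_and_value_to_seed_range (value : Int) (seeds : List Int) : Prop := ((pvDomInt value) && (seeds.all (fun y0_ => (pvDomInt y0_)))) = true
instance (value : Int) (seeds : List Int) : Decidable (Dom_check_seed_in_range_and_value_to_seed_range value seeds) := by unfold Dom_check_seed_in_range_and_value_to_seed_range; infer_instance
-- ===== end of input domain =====

-- B sorts the (start,length) pairs by start and does one early-terminating scan, replacing A's unsorted scan plus filter plus min() pass; objective: alternative.


-- ===== PORT A =====
-- A's for-loop over zip(seeds[::2], seeds[1::2]), carrying the accumulated seed_starts list;
-- the [] case is the code after the loop (filter comprehension, then min()).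
def pvLoopA (value : Int) : List (Int × Int) → List Int → Bool × Int
  | [], seed_starts =>
      let possible_starts := seed_starts.filter (fun start => decide (start > value))
      match PySem.List.min? possible_starts (fun x => x) with
      | none => (false, -1)
      | some m => (false, m - value)
  | (seed_start, range_length) :: rest, seed_starts =>
      let seed_starts' := seed_starts ++ [seed_start]
      let delta := value - seed_start
      if delta ≥ 0 ∧ delta ≤ range_length then (true, -1)
      else pvLoopA value rest seed_starts'

def check_seed_in_range_and_value_to_seed_range (value : Int) (seeds : List Int) : Bool × Int :=
  let evens := (PySem.List.slice? seeds none none 2).getD []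
  let odds := (PySem.List.slice? seeds (some 1) none 2).getD []
  pvLoopA value (evens.zip odds) []

-- ===== PORT B =====
-- B's single scan of the pairs sorted by start: first start above value ends the
-- scan with the jump; otherwise a containment check; falls off the end with -1.
def pvLoopB (value : Int) : List (Int × Int) → Bool × Int
  | [] => (false, -1)
  | (seed_start, range_length) :: rest =>
      if seed_start > value then (false, seed_start - value)
      else if value - seed_start ≤ range_length then (true, -1)
      else pvLoopB value rest

def check_seed_in_range_and_value_to_seed_range_alt (value : Int) (seeds : List Int) : Bool × Int :=
  let evens := (PySem.List.slice? seeds none none 2).getD []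
  let odds := (PySem.List.slice? seeds (some 1) none 2).getD []
  pvLoopB value (PySem.List.sorted (evens.zip odds) (fun pair => pair.1) false)

-- ===== PRECONDITION & SPEC =====
def Spec_check_seed_in_range_and_value_to_seed_range (value : Int) (seeds : List Int) (out : Bool × Int) : Prop := out = check_seed_in_range_and_value_to_seed_range_alt value seeds
instance (value : Int) (seeds : List Int) (out : Bool × Int) : Decidable (Spec_check_seed_in_range_and_value_to_seed_range value seeds out) := by unfold Spec_check_seed_in_range_and_value_to_seed_range; infer_instance

-- ===== CLAIM (what is proved, stated in full; the proofs are below) =====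
def Claim_equal_check_seed_in_range_and_value_to_seed_range : Prop := ∀ (value : Int) (seeds : List Int), Dom_check_seed_in_range_and_value_to_seed_range value seeds → Spec_check_seed_in_range_and_value_to_seed_range value seeds (check_seed_in_range_and_value_to_seed_range value seeds)

-- ===== LEMMAS AND PROOFS =====

-- Order-insensitive characterization of the common result.
def pvHit (value : Int) (ps : List (Int × Int)) : Bool :=
  ps.any (fun p => decide (0 ≤ value - p.1 ∧ value - p.1 ≤ p.2))

def pvJump (value : Int) (starts : List Int) : Bool × Int :=
  match PySem.List.min? (starts.filter (fun s => decide (s > value))) (fun x => x) with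
  | none => (false, -1)
  | some m => (false, m - value)

def pvSpec (value : Int) (ps : List (Int × Int)) : Bool × Int :=
  if pvHit value ps then (true, -1) else pvJump value (ps.map Prod.fst)

theorem pvLoopA_eq_spec (value : Int) (ps : List (Int × Int)) (acc : List Int) :
    pvLoopA value ps acc =
      if pvHit value ps then (true, -1) else pvJump value (acc ++ ps.map Prod.fst) := by
  induction ps generalizing acc with
  | nil => simp [pvLoopA, pvHit, pvJump]
  | cons hd rest ih =>
      obtain ⟨s, r⟩ := hd
      simp only [pvLoopA]
      by_cases h : value - s ≥ 0 ∧ value - s ≤ r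
      · rw [if_pos h]
        obtain ⟨h1, h2⟩ := h
        have : pvHit value ((s, r) :: rest) = true := by
          simp only [pvHit, List.any_cons, Bool.or_eq_true, decide_eq_true_eq]
          exact Or.inl ⟨by omega, by omega⟩
        rw [this, if_pos rfl]
      · rw [if_neg h, ih]
        have hd0 : (decide (0 ≤ value - s ∧ value - s ≤ r)) = false := by
          simp only [decide_eq_false_iff_not]; omega
        have hhit : pvHit value ((s, r) :: rest) = pvHit value rest := by
          simp only [pvHit, List.any_cons, hd0, Bool.false_or]
        rw [hhit]
        congr 1
        simp [List.append_assoc]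

theorem pv_min?_id_perm (l l' : List Int) (h : l.Perm l') :
    PySem.List.min? l (fun x => x) = PySem.List.min? l' (fun x => x) := by
  cases hm : PySem.List.min? l (fun x => x) with
  | none =>
      rw [PySem.List.min?_eq_none_iff] at hm
      subst hm
      have h2 : l' = [] := h.symm.eq_nil
      subst h2
      rfl
  | some m =>
      cases hm' : PySem.List.min? l' (fun x => x) with
      | none =>
          rw [PySem.List.min?_eq_none_iff] at hm'
          subst hm'
          have h2 : l = [] := h.eq_nil
          subst h2
          simp [PySem.List.min?] at hm
      | some m' =>
          have h1 := PySem.List.min?_mem hm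
          have h2 := PySem.List.min?_isMin hm
          have h3 := PySem.List.min?_mem hm'
          have h4 := PySem.List.min?_isMin hm'
          have hmm' : m ≤ m' := h2 m' (h.mem_iff.mpr h3)
          have hm'm : m' ≤ m := h4 m (h.mem_iff.mp h1)
          exact congrArg some (le_antisymm hmm' hm'm)

theorem pvSpec_perm (value : Int) (ps qs : List (Int × Int)) (h : ps.Perm qs) :
    pvSpec value ps = pvSpec value qs := by
  unfold pvSpec pvHit pvJump
  rw [h.any_eq]
  rw [pv_min?_id_perm _ _ (((h.map Prod.fst).filter _))]

theorem pvLoopB_eq_spec (value : Int) (ps : List (Int × Int))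
    (hs : ps.Pairwise (fun a b => a.1 ≤ b.1)) :
    pvLoopB value ps = pvSpec value ps := by
  induction ps with
  | nil => simp [pvLoopB, pvSpec, pvHit, pvJump, PySem.List.min?]
  | cons hd rest ih =>
      obtain ⟨s, r⟩ := hd
      have hall : ∀ p ∈ rest, s ≤ p.1 := fun p hp => (List.pairwise_cons.mp hs).1 p hp
      have hrest := (List.pairwise_cons.mp hs).2
      simp only [pvLoopB]
      by_cases hgt : s > value
      · rw [if_pos hgt]
        have hhit : pvHit value ((s, r) :: rest) = false := by
          simp only [pvHit, List.any_eq_false, decide_eq_true_eq]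
          intro p hp
          rcases List.mem_cons.mp hp with h1 | h1
          · subst h1; omega
          · have := hall p h1; omega
        unfold pvSpec
        rw [hhit]
        simp only [Bool.false_eq_true, if_false]
        unfold pvJump
        have hfilt : ((((s, r) :: rest).map Prod.fst).filter (fun x => decide (x > value)))
            = s :: ((rest.map Prod.fst).filter (fun x => decide (x > value))) := by
          simp [hgt]
        rw [hfilt, PySem.List.min?_id_cons]
        have hfold : ((rest.map Prod.fst).filter (fun x => decide (x > value))).foldl min s = s := by
          have hmem := PySem.List.foldl_min_mem ((rest.map Prod.fst).filter (fun x => decide (x > value))) s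
          have hle := (PySem.List.foldl_min_le ((rest.map Prod.fst).filter (fun x => decide (x > value))) s).1
          rcases hmem with h1 | h1
          · exact h1
          · have h2 := List.mem_map.mp (List.mem_of_mem_filter h1)
            obtain ⟨p, hp, hps⟩ := h2
            have := hall p hp
            omega
        rw [hfold]
      · rw [if_neg hgt]
        by_cases hcov : value - s ≤ r
        · rw [if_pos hcov]
          have hhit : pvHit value ((s, r) :: rest) = true := by
            simp only [pvHit, List.any_cons, Bool.or_eq_true, decide_eq_true_eq]
            exact Or.inl ⟨by omega, hcov⟩
          unfold pvSpec
          rw [hhit, if_pos rfl]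
        · rw [if_neg hcov, ih hrest]
          unfold pvSpec
          have hd0 : (decide (0 ≤ value - s ∧ value - s ≤ r)) = false := by
            simp only [decide_eq_false_iff_not]; omega
          have hhit : pvHit value ((s, r) :: rest) = pvHit value rest := by
            simp only [pvHit, List.any_cons, hd0, Bool.false_or]
          rw [hhit]
          congr 1
          unfold pvJump
          have hfilt : ((((s, r) :: rest).map Prod.fst).filter (fun x => decide (x > value)))
              = ((rest.map Prod.fst).filter (fun x => decide (x > value))) := by
            simp [hgt]
          rw [hfilt]

-- ===== VERDICT (by name: the statement is the Claim_ definition above) =====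
theorem check_seed_in_range_and_value_to_seed_range_spec : Claim_equal_check_seed_in_range_and_value_to_seed_range := by
  intro value seeds _
  unfold Spec_check_seed_in_range_and_value_to_seed_range
  unfold check_seed_in_range_and_value_to_seed_range check_seed_in_range_and_value_to_seed_range_alt
  set pairs := (((PySem.List.slice? seeds none none 2).getD []).zip ((PySem.List.slice? seeds (some 1) none 2).getD [])) with hp
  have hperm : (PySem.List.sorted pairs (fun pair => pair.1) false).Perm pairs :=
    PySem.List.sorted_perm pairs (fun pair => pair.1) false
  rw [pvLoopA_eq_spec value pairs []]
  rw [pvLoopB_eq_spec value _ (PySem.List.sorted_pairwise pairs (fun pair => pair.1))]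
  rw [pvSpec_perm value _ pairs hperm]
  simp [pvSpec]
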